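-- pv_equiv track=rewrite | github.com/daviddwlee84/LeetCode | Contest/LeetCodeWeeklyContest/WeeklyContest190/3.py | isPseudoPalindromic
-- ===== SOURCE A (Python) =====
-- from typing import List
-- from collections import Counter
--
-- def isPseudoPalindromic(path: List[int]) -> bool:
--
--     odd_count = 0
--     even_count = 0
--
--     for _, count in Counter(path).items():
--         if count % 2 == 0:
--             even_count += 1
--         else:
--             odd_count += 1
--
--     if len(path) % 2 == 0:
--         if odd_count != 0:
--             return False
--         else:
--             return True
--     else:
--         if odd_count != 1:
--             return False
--         else:
--             return True
-- ===== SOURCE B (Python) =====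
-- def isPseudoPalindromic(path):
--     seen = set()
--     for v in path:
--         if v in seen:
--             seen.remove(v)
--         else:
--             seen.add(v)
--     return len(seen) <= 1
-- ===== Notes on version B (the rewrite author's own statement) =====
-- stated objective: simpler
-- what changed: Replaces the Counter frequency table, the even/odd classification loop and the len(path)-parity branching with a single pass that toggles each value in a parity set, returning len(seen) <= 1.
import Mathlib
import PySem

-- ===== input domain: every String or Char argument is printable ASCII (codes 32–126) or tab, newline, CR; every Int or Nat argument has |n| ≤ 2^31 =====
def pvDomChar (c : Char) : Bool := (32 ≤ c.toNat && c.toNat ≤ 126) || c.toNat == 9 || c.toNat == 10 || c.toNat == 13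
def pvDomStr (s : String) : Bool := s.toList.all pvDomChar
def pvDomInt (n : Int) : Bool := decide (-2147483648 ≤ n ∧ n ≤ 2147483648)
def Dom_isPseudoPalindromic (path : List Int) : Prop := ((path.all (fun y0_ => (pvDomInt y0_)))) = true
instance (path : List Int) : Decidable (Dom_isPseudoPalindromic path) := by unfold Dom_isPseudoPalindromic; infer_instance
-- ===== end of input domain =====

-- B replaces A's Counter + even/odd classification + length-parity branches by one
-- parity-set toggle pass ending in 'len(seen) <= 1' (simpler, same O(n) cost).

-- ===== PORT A =====
def isPseudoPalindromic (path : List Int) : Bool :=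
  -- odd_count/even_count accumulated over Counter(path).items(); '% 2' with positive
  -- divisor 2 coincides with Python's '%'
  let counts := ((PySem.Dict.counter path).items).foldl
    (fun (st : Int × Int) kv => if kv.2 % 2 == 0 then (st.1, st.2 + 1) else (st.1 + 1, st.2))
    (0, 0)
  if (path.length : Int) % 2 == 0 then
    (if counts.1 != 0 then false else true)
  else
    (if counts.1 != 1 then false else true)

-- ===== PORT B =====
-- guarded 'seen.remove(v)' (v is in seen) is exactly Set.discard
def isPseudoPalindromic_alt (path : List Int) : Bool :=
  let seen := path.foldl
    (fun (s : PySem.Set Int) v =>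
      if PySem.Set.contains s v then PySem.Set.discard s v else PySem.Set.add s v)
    PySem.Set.empty
  decide (PySem.Set.len seen ≤ 1)

-- ===== PRECONDITION & SPEC =====
def Spec_isPseudoPalindromic (path : List Int) (out : Bool) : Prop := out = isPseudoPalindromic_alt path
instance (path : List Int) (out : Bool) : Decidable (Spec_isPseudoPalindromic path out) := by unfold Spec_isPseudoPalindromic; infer_instance

-- ===== CLAIM (what is proved, stated in full; the proofs are below) =====
def Claim_equal_isPseudoPalindromic : Prop := ∀ (path : List Int), Dom_isPseudoPalindromic path → Spec_isPseudoPalindromic path (isPseudoPalindromic path)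

-- ===== LEMMAS AND PROOFS =====

-- B's toggle step
def pvToggle (s : PySem.Set Int) (v : Int) : PySem.Set Int :=
  if PySem.Set.contains s v then PySem.Set.discard s v else PySem.Set.add s v

theorem mem_pvToggle (s : PySem.Set Int) (v x : Int) :
    x ∈ pvToggle s v ↔ (if x = v then x ∉ s else x ∈ s) := by
  unfold pvToggle
  by_cases h : v ∈ s <;>
    simp [h, PySem.Set.mem_discard, PySem.Set.mem_add] <;>
    rcases eq_or_ne x v with rfl | hx <;> simp_all

theorem nodup_pvToggle (s : PySem.Set Int) (v : Int) (hs : s.Nodup) :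
    (pvToggle s v).Nodup := by
  unfold pvToggle
  by_cases h : v ∈ s
  · simp [h, PySem.Set.nodup_discard s v hs]
  · have := PySem.Set.nodup_add s v hs
    simp only [PySem.Set.add_eq_ite, if_neg h] at this
    simp [h, this]

theorem length_pvToggle (s : PySem.Set Int) (v : Int) (hs : s.Nodup) :
    (pvToggle s v).length % 2 = (s.length + 1) % 2 := by
  unfold pvToggle
  by_cases h : v ∈ s
  · -- s is a permutation of v :: discard s v, so the length drops by exactly one
    have hnd2 : (v :: PySem.Set.discard s v).Nodup := by
      simp only [List.nodup_cons]
      exact ⟨by simp [PySem.Set.mem_discard], PySem.Set.nodup_discard s v hs⟩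
    have hperm : s.Perm (v :: PySem.Set.discard s v) := by
      rw [List.perm_ext_iff_of_nodup hs hnd2]
      intro x
      simp [PySem.Set.mem_discard]
      rcases eq_or_ne x v with rfl | hx <;> simp_all
    have hlen := hperm.length_eq
    simp only [List.length_cons] at hlen
    simp [h]
    omega
  · simp only [PySem.Set.contains_eq_listContains, List.contains_eq_mem, h, decide_false,
      Bool.false_eq_true, if_false, PySem.Set.add_of_not_mem h, List.length_append,
      List.length_singleton]

-- invariant of B's fold: nodup, membership = odd count, length parity
theorem pvFold_inv (l : List Int) (s : PySem.Set Int) (hs : s.Nodup) :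
    (l.foldl pvToggle s).Nodup ∧
    (∀ x, x ∈ l.foldl pvToggle s ↔ (if List.count x l % 2 = 1 then x ∉ s else x ∈ s)) ∧
    (l.foldl pvToggle s).length % 2 = (s.length + l.length) % 2 := by
  induction l generalizing s with
  | nil => simp [hs]
  | cons v t ih =>
    obtain ⟨h1, h2, h3⟩ := ih (pvToggle s v) (nodup_pvToggle s v hs)
    simp only [List.foldl_cons]
    refine ⟨h1, ?_, ?_⟩
    · intro x
      rw [h2 x]
      have hm := mem_pvToggle s v x
      rcases eq_or_ne x v with rfl | hx
      · rw [List.count_cons_self]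
        simp only [if_pos rfl] at hm
        by_cases hodd : List.count x t % 2 = 1
        · have h2' : ¬ (List.count x t + 1) % 2 = 1 := by omega
          simp [hodd, h2', hm]
        · have h2' : (List.count x t + 1) % 2 = 1 := by omega
          simp [hodd, h2', hm]
      · rw [List.count_cons_of_ne hx.symm]
        simp only [if_neg hx] at hm
        by_cases hodd : List.count x t % 2 = 1 <;> simp [hodd, hm]
    · rw [h3]
      have := length_pvToggle s v hs
      simp only [List.length_cons]
      omega

-- A's classification fold: the first component counts the odd entries
theorem pvFoldA_fst (ks : List (Int × Int)) (a b : Int) :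
    (ks.foldl (fun (st : Int × Int) kv =>
        if kv.2 % 2 == 0 then (st.1, st.2 + 1) else (st.1 + 1, st.2)) (a, b)).1
      = a + ((ks.filter (fun kv => !(kv.2 % 2 == 0))).length : Int) := by
  induction ks generalizing a b with
  | nil => simp
  | cons kv t ih =>
    simp only [List.foldl_cons, List.filter_cons]
    by_cases h : (kv.2 % 2 == 0) = true
    · rw [if_pos h, ih]
      simp [h]
    · rw [if_neg h, ih]
      simp only [Bool.not_eq_true] at h
      simp [h]
      ring

-- ===== VERDICT (by name: the statement is the Claim_ definition above) =====
theorem isPseudoPalindromic_spec : Claim_equal_isPseudoPalindromic := by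
  intro path _
  unfold Spec_isPseudoPalindromic isPseudoPalindromic isPseudoPalindromic_alt
  have hfun : (fun (s : PySem.Set Int) v =>
      if PySem.Set.contains s v then PySem.Set.discard s v else PySem.Set.add s v) = pvToggle :=
    rfl
  rw [hfun]
  dsimp only
  obtain ⟨hnd, hmem, hpar⟩ := pvFold_inv path PySem.Set.empty List.nodup_nil
  set seen := path.foldl pvToggle PySem.Set.empty with hseen
  -- the members of seen are exactly the values with odd count
  have hmem' : ∀ x, x ∈ seen ↔ List.count x path % 2 = 1 := by
    intro x
    rw [hmem x]
    by_cases h : List.count x path % 2 = 1 <;> simp [h, PySem.Set.empty]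
  -- A's odd_count equals seen.length
  have hlen : ((List.map (fun k => (k, (List.count k path : Int))) (PySem.Set.ofList path)).filter
      (fun kv => !(kv.2 % 2 == 0))).length = seen.length := by
    rw [← List.countP_eq_length_filter, List.countP_map]
    have hcongr : ∀ x ∈ PySem.Set.ofList path,
        (((fun kv : Int × Int => !(kv.2 % 2 == 0)) ∘ fun k => (k, (List.count k path : Int))) x = true
          ↔ decide (List.count x path % 2 = 1) = true) := by
      intro x _
      by_cases hc : List.count x path % 2 = 1
      · have h1 : (List.count x path : Int) % 2 = 1 := by omega
        simp [Function.comp, h1, hc]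
      · have h1 : (List.count x path : Int) % 2 = 0 := by omega
        simp [Function.comp, h1, hc]
    rw [List.countP_congr hcongr, List.countP_eq_length_filter]
    have hperm : ((PySem.Set.ofList path).filter
        (fun x => decide (List.count x path % 2 = 1))).Perm seen := by
      rw [List.perm_ext_iff_of_nodup ((PySem.Set.nodup_ofList path).filter _) hnd]
      intro x
      rw [List.mem_filter, hmem' x, PySem.Set.mem_ofList]
      constructor
      · rintro ⟨-, h⟩
        simpa using h
      · intro h
        have hx : x ∈ path := List.count_pos_iff.mp (by omega)
        exact ⟨hx, by simpa using h⟩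
    exact hperm.length_eq
  have hodd : ((PySem.Dict.counter path).items.foldl
      (fun (st : Int × Int) kv => if kv.2 % 2 == 0 then (st.1, st.2 + 1) else (st.1 + 1, st.2))
      (0, 0)).1 = (seen.length : Int) := by
    rw [PySem.Dict.items_counter, pvFoldA_fst, hlen]
    ring
  rw [hodd]
  -- conclude by the parity of seen.length
  have hp2 : seen.length % 2 = path.length % 2 := by
    simpa [PySem.Set.empty] using hpar
  by_cases hev : path.length % 2 = 0
  · have e1 : (((path.length : Int)) % 2 == 0) = true := by rw [beq_iff_eq]; omega
    rw [if_pos e1]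
    by_cases hz : seen.length = 0
    · simp [hz, PySem.Set.len]
    · have h0 : ¬ ((seen.length : Int) = 0) := by omega
      have h2 : ¬ ((seen.length : Int) ≤ 1) := by omega
      have hnil : ¬ seen = [] := fun h => hz (by simp [h])
      simp [PySem.Set.len, bne, h0, h2, hnil]
  · have e1 : ¬ ((((path.length : Int)) % 2 == 0) = true) := by rw [beq_iff_eq]; omega
    rw [if_neg e1]
    by_cases h1 : seen.length = 1
    · simp [h1, PySem.Set.len]
    · have hne : ¬ ((seen.length : Int) = 1) := by omega
      have hgt : ¬ ((seen.length : Int) ≤ 1) := by omega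
      have hnil : ¬ seen = [] := by
        intro h
        rw [h] at hp2
        simp at hp2
        omega
      simp [PySem.Set.len, bne, hne, hgt, hnil]
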